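-- pv_equiv track=rewrite | github.com/ruiny02/SPL_ws | more_tests/run_tests.py | solve_phrase
-- ===== SOURCE A (Python) =====
-- def normalize(word: str) -> str:
--     return word.lower()
--
-- def is_sep(ch: str) -> bool:
--     return ch in (" ", "\t")
--
-- def tokenize_line(line: str) -> list[tuple[str, int]]:
--     tokens: list[tuple[str, int]] = []
--     i = 0
--     while i < len(line):
--         while i < len(line) and is_sep(line[i]):
--             i += 1
--         if i >= len(line):
--             break
--         start = i
--         while i < len(line) and not is_sep(line[i]):
--             i += 1
--         tokens.append((line[start:i], start))
--     return tokens
--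
-- def format_result(items: list[str]) -> str:
--     if not items:
--         return "\n"
--     return " ".join(items) + " \n"
--
-- def phrase_valid_end(line: str, end: int) -> bool:
--     return end == len(line) or is_sep(line[end])
--
-- def solve_phrase(lines: list[str], query: str) -> str:
--     phrase = query[1:-1]
--     first_word_end = 0
--     while first_word_end < len(phrase) and not is_sep(phrase[first_word_end]):
--         first_word_end += 1
--     if first_word_end == 0:
--         return "\n"
--     first_word = normalize(phrase[:first_word_end])
--
--     hits: list[str] = []
--     for line_no, line in enumerate(lines, start=1):
--         for token, start in tokenize_line(line):
--             end = start + len(phrase)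
--             if normalize(token) != first_word:
--                 continue
--             if end > len(line):
--                 continue
--             if line[start:end].lower() != phrase.lower():
--                 continue
--             if not phrase_valid_end(line, end):
--                 continue
--             hits.append(f"{line_no}:{start}")
--     return format_result(hits)
-- ===== SOURCE B (Python) =====
-- def solve_phrase(lines: list[str], query: str) -> str:
--     phrase = query[1:-1]
--     if not phrase or phrase[0] in (" ", "\t"):
--         return "\n"
--     lp = phrase.lower()
--     m = len(phrase)
--     hits: list[str] = []
--     for line_no, line in enumerate(lines, start=1):
--         n = len(line)
--         for i in range(n):
--             if (i == 0 or line[i - 1] in (" ", "\t")) \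
--                and line[i:i + m].lower() == lp \
--                and (i + m == n or (i + m < n and line[i + m] in (" ", "\t"))):
--                 hits.append(f"{line_no}:{i}")
--     if not hits:
--         return "\n"
--     return " ".join(hits) + " \n"
-- ===== Notes on version B (the rewrite author's own statement) =====
-- stated objective: simpler
-- what changed: B drops A's tokenizer and its redundant token/first-word comparison entirely: per line it scans candidate start positions directly and keeps a position iff the previous character is a separator (or start of line), the phrase matches case-insensitively there, and the position after the phrase is again a boundary.
import Mathlib
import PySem

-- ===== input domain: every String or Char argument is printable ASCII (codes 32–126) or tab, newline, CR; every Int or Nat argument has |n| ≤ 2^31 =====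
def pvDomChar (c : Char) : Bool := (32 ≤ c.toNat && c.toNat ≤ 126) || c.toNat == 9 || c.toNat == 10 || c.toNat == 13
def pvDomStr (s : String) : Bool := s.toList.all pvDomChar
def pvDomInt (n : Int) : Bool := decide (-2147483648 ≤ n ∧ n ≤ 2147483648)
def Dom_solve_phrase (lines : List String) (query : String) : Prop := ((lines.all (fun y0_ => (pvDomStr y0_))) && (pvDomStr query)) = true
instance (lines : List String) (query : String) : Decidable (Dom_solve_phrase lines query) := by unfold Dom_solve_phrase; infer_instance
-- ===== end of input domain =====

-- B replaces A's tokenizer (and A's redundant token/first-word comparison) by a direct flat scan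
-- over candidate start positions with a word-boundary predicate: simpler, one flat pass per line.

-- ===== PORT A =====
-- is_sep (Python checks a length-1 string; ported on the Char)
def isSep (c : Char) : Bool := c == ' ' || c == '\t'

-- the two inline 'while i < len(..) and (not) is_sep(..)' loop shapes of A (tokenize_line's
-- skip-separators loop and consume-word loop; the latter is also A's first_word_end loop)
def skipSepA (l : List Char) (i : Nat) : Nat :=
  if h : i < l.length then
    if isSep l[i] then skipSepA l (i + 1) else i
  else i
termination_by l.length - i

def skipWordA (l : List Char) (i : Nat) : Nat :=
  if h : i < l.length then
    if isSep l[i] then i else skipWordA l (i + 1)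
  else i
termination_by l.length - i

-- facts cited by tokenizeA's decreasing_by
theorem skipSepA_ge (l : List Char) (i : Nat) : i ≤ skipSepA l i := by
  fun_induction skipSepA l i <;> omega

theorem skipWordA_ge (l : List Char) (i : Nat) : i ≤ skipWordA l i := by
  fun_induction skipWordA l i <;> omega

theorem skipWordA_gt (l : List Char) (i : Nat) (h : i < l.length)
    (hs : isSep (l.getD i ' ') = false) : i < skipWordA l i := by
  rw [skipWordA]
  simp only [h, dif_pos]
  rw [List.getD_eq_getElem l ' ' h] at hs
  simp only [hs, if_neg Bool.false_ne_true]
  have := skipWordA_ge l (i + 1); omega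

theorem skipSepA_not_sep (l : List Char) (i : Nat) (h : skipSepA l i < l.length) :
    isSep (l.getD (skipSepA l i) ' ') = false := by
  fun_induction skipSepA l i with
  | case1 i hi hsep ih => exact ih h
  | case2 i hi hsep =>
      rw [List.getD_eq_getElem l ' ' h]; simpa using hsep
  | case3 i hi => omega

-- tokenize_line
def tokenizeA (l : List Char) (i : Nat) : List (List Char × Nat) :=
  let i' := skipSepA l i
  if _h : i' < l.length then
    let j := skipWordA l i'
    (PySem.List.slice l (some (i' : Int)) (some (j : Int)), i') :: tokenizeA l j
  else []
termination_by l.length - i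
decreasing_by
  have h1 := skipSepA_ge l i
  have h2 := skipWordA_gt l (skipSepA l i) _h (skipSepA_not_sep l i _h)
  omega

-- normalize
def normalizeA (w : List Char) : List Char := PySem.Chars.lower w

-- phrase_valid_end (line[end] is only read when end ≠ len; A only calls it with end ≤ len)
def phraseValidEndA (l : List Char) (e : Nat) : Bool :=
  e == l.length || isSep (l.getD e ' ')

-- f"{line_no}:{start}" (the same f-string appears in A and in B)
def hitStr (ln : Int) (s : Nat) : String :=
  PySem.Int.toStr ln ++ ":" ++ PySem.Int.toStr (s : Int)

-- format_result
def formatResultA (items : List String) : String :=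
  if items.isEmpty then "\n" else PySem.Str.join " " items ++ " \n"

-- A's inner 'for token, start in tokenize_line(line)' loop (the four 'continue' tests in order)
def lineHitsA (phrase firstWord : List Char) (ln : Int) (l : List Char) (hits : List String) : List String :=
  (tokenizeA l 0).foldl (fun hits t =>
    let e := t.2 + phrase.length
    if normalizeA t.1 == firstWord && !(decide (e > l.length)) &&
       PySem.Chars.lower (PySem.List.slice l (some (t.2 : Int)) (some (e : Int)))
         == PySem.Chars.lower phrase &&
       phraseValidEndA l e
    then hits ++ [hitStr ln t.2] else hits) hits

def solve_phrase (lines : List String) (query : String) : String :=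
  let phrase := PySem.List.slice query.toList (some 1) (some (-1))
  let fwe := skipWordA phrase 0
  if fwe = 0 then "\n"
  else
    let firstWord := normalizeA (PySem.List.slice phrase none (some (fwe : Int)))
    let hits := (PySem.List.enumerate lines 1).foldl
      (fun hits p => lineHitsA phrase firstWord p.1 p.2.toList hits) []
    formatResultA hits

-- ===== PORT B =====
-- B's inner 'for i in range(n)' loop: keep i iff i is at a word boundary, the phrase matches
-- case-insensitively at i, and position i+m is again a boundary
def lineHitsB (phrase lp : List Char) (ln : Int) (l : List Char) (hits : List String) : List String :=
  (List.range l.length).foldl (fun hits (i : Nat) =>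
    if (i == 0 || isSep (l.getD (i - 1) ' ')) &&
       PySem.Chars.lower (PySem.List.slice l (some (i : Int)) (some ((i : Int) + (phrase.length : Int)))) == lp &&
       (i + phrase.length == l.length ||
         (decide (i + phrase.length < l.length) && isSep (l.getD (i + phrase.length) ' ')))
    then hits ++ [hitStr ln i] else hits) hits

def solve_phrase_alt (lines : List String) (query : String) : String :=
  let phrase := PySem.List.slice query.toList (some 1) (some (-1))
  match phrase with
  | [] => "\n"
  | c :: rest =>
    if isSep c then "\n"
    else
      let hits := (PySem.List.enumerate lines 1).foldl
        (fun hits p => lineHitsB (c :: rest) (PySem.Chars.lower (c :: rest)) p.1 p.2.toList hits) []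
      if hits.isEmpty then "\n" else PySem.Str.join " " hits ++ " \n"

-- ===== PRECONDITION & SPEC =====
def Spec_solve_phrase (lines : List String) (query : String) (out : String) : Prop := out = solve_phrase_alt lines query
instance (lines : List String) (query : String) (out : String) : Decidable (Spec_solve_phrase lines query out) := by unfold Spec_solve_phrase; infer_instance

-- ===== CLAIM (what is proved, stated in full; the proofs are below) =====
def Claim_equal_solve_phrase : Prop := ∀ (lines : List String) (query : String), Dom_solve_phrase lines query → Spec_solve_phrase lines query (solve_phrase lines query)

-- ===== LEMMAS AND PROOFS =====

-- the two loop conditions as predicates (proof-local names for the lambdas inside lineHitsA/B)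
def condA (phrase firstWord l : List Char) (t : List Char × Nat) : Bool :=
  normalizeA t.1 == firstWord && !(decide (t.2 + phrase.length > l.length)) &&
  PySem.Chars.lower (PySem.List.slice l (some (t.2 : Int)) (some ((t.2 + phrase.length : Nat) : Int)))
    == PySem.Chars.lower phrase &&
  phraseValidEndA l (t.2 + phrase.length)

def condB (phrase lp l : List Char) (i : Nat) : Bool :=
  (i == 0 || isSep (l.getD (i - 1) ' ')) &&
  PySem.Chars.lower (PySem.List.slice l (some (i : Int)) (some ((i : Int) + (phrase.length : Int)))) == lp &&
  (i + phrase.length == l.length ||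
    (decide (i + phrase.length < l.length) && isSep (l.getD (i + phrase.length) ' ')))

-- remaining lemmas
theorem isSep_iff (c : Char) : isSep c = true ↔ (c.toNat = 32 ∨ c.toNat = 9) := by
  unfold isSep
  simp only [Bool.or_eq_true, beq_iff_eq]
  constructor
  · rintro (rfl | rfl) <;> simp [Char.toNat]
  · rintro (h | h)
    · left; rw [← Char.ofNat_toNat c, h]
    · right; rw [← Char.ofNat_toNat c, h]

theorem isSep_lowerChar (c : Char) : isSep (PySem.Chars.lowerChar c) = isSep c := by
  unfold PySem.Chars.lowerChar PySem.Chars.isupper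
  by_cases h : 'A' ≤ c ∧ c ≤ 'Z'
  · have h1 : 65 ≤ c.toNat := h.1
    have h2 : c.toNat ≤ 90 := h.2
    have hv : (c.toNat + 32).isValidChar := by constructor; omega
    simp only [h.1, h.2, decide_true, Bool.and_self, if_true]
    have ht : (Char.ofNat (c.toNat + 32)).toNat = c.toNat + 32 := by
      rw [Char.toNat_ofNat, if_pos hv]
    rw [show (isSep c) = false by rw [← Bool.not_eq_true, isSep_iff]; omega]
    rw [← Bool.not_eq_true, isSep_iff, ht]; omega
  · have : ¬ (decide ('A' ≤ c) && decide (c ≤ 'Z')) = true := by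
      simpa [Decidable.not_and_iff_not_or_not] using h
    simp only [Bool.not_eq_true] at this
    rw [this, if_neg Bool.false_ne_true]

theorem skipWordA_le (l : List Char) (i : Nat) (hi : i ≤ l.length) : skipWordA l i ≤ l.length := by
  fun_induction skipWordA l i with
  | case1 i hi' hsep => omega
  | case2 i hi' hsep ih => exact ih (by omega)
  | case3 i hi' => omega

theorem skipWordA_not_sep (l : List Char) (i : Nat) :
    ∀ k, i ≤ k → k < skipWordA l i → k < l.length ∧ isSep (l.getD k ' ') = false := by
  fun_induction skipWordA l i with
  | case1 i hi' hsep => intro k h1 h2; omega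
  | case2 i hi' hsep ih =>
      intro k h1 h2
      rcases Nat.eq_or_lt_of_le h1 with rfl | hlt
      · exact ⟨hi', by rw [List.getD_eq_getElem l ' ' hi']; simpa using hsep⟩
      · exact ih k hlt h2
  | case3 i hi' => intro k h1 h2; omega

theorem skipWordA_stop (l : List Char) (i : Nat) (h : skipWordA l i < l.length) :
    isSep (l.getD (skipWordA l i) ' ') = true := by
  fun_induction skipWordA l i with
  | case1 i hi' hsep => rw [List.getD_eq_getElem l ' ' h]; simpa using hsep
  | case2 i hi' hsep ih => exact ih h
  | case3 i hi' => omega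

theorem skipWordA_eq (l : List Char) (i v : Nat) (hi : i ≤ l.length) (hiv : i ≤ v) (hv : v ≤ l.length)
    (hmid : ∀ k, i ≤ k → k < v → isSep (l.getD k ' ') = false)
    (hend : v = l.length ∨ isSep (l.getD v ' ') = true) : skipWordA l i = v := by
  fun_induction skipWordA l i with
  | case1 i hi' hsep =>
      by_contra hne
      have hlt : i < v := by omega
      have := hmid i (le_refl i) hlt
      rw [List.getD_eq_getElem l ' ' hi'] at this
      simp [this] at hsep
  | case2 i hi' hsep ih =>
      have hne : v ≠ i := by
        rintro rfl
        rcases hend with h | h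
        · omega
        · rw [List.getD_eq_getElem l ' ' hi'] at h; simp [h] at hsep
      exact ih (by omega) (by omega) (fun k h1 h2 => hmid k (by omega) h2)
  | case3 i hi' => omega

theorem skipSepA_sep (l : List Char) (i : Nat) :
    ∀ k, i ≤ k → k < skipSepA l i → k < l.length ∧ isSep (l.getD k ' ') = true := by
  fun_induction skipSepA l i with
  | case1 i hi' hsep ih =>
      intro k h1 h2
      rcases Nat.eq_or_lt_of_le h1 with rfl | hlt
      · exact ⟨hi', by rw [List.getD_eq_getElem l ' ' hi']; simpa using hsep⟩
      · exact ih k hlt h2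
  | case2 i hi' hsep => intro k h1 h2; omega
  | case3 i hi' => intro k h1 h2; omega

-- pointwise consequences of the case-insensitive substring match
theorem lower_slice_pointwise (p l : List Char) (s : Nat) (hs : s ≤ l.length)
    (hsub : PySem.Chars.lower (PySem.List.slice l (some (s : Int)) (some ((s + p.length : Nat) : Int)))
            = PySem.Chars.lower p) :
    s + p.length ≤ l.length ∧
    ∀ k, k < p.length → PySem.Chars.lowerChar (l.getD (s + k) ' ') = PySem.Chars.lowerChar (p.getD k ' ') := by
  rw [PySem.List.slice_natCast, Nat.add_sub_cancel_left] at hsub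
  unfold PySem.Chars.lower at hsub
  have hlen := congrArg List.length hsub
  simp only [List.length_map, List.length_take, List.length_drop] at hlen
  have hle : s + p.length ≤ l.length := by omega
  refine ⟨hle, fun k hk => ?_⟩
  have := congrArg (fun xs => xs[k]?) hsub
  simp only [List.getElem?_map, List.getElem?_take, List.getElem?_drop] at this
  rw [if_pos hk] at this
  have hsk : s + k < l.length := by omega
  rw [List.getElem?_eq_getElem hsk, List.getElem?_eq_getElem hk] at this
  simp only [Option.map_some] at this
  rw [List.getD_eq_getElem l ' ' hsk, List.getD_eq_getElem p ' ' hk]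
  exact Option.some.inj this

theorem condB_false_of_sep (p l : List Char) (hm : 0 < p.length)
    (hp0 : isSep (p.getD 0 ' ') = false) (k : Nat) (hk : k < l.length)
    (hsep : isSep (l.getD k ' ') = true) : condB p (PySem.Chars.lower p) l k = false := by
  unfold condB
  suffices h : (PySem.Chars.lower (PySem.List.slice l (some (k : Int)) (some ((k : Int) + (p.length : Int))))
      == PySem.Chars.lower p) = false by
    simp [h]
  rw [beq_eq_false_iff_ne]
  intro heq
  rw [show ((k : Int) + (p.length : Int)) = ((k + p.length : Nat) : Int) by push_cast; ring] at heq
  obtain ⟨hle, hpt⟩ := lower_slice_pointwise p l k (le_of_lt hk) heq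
  have h0 := hpt 0 hm
  rw [Nat.add_zero] at h0
  have hss : isSep (l.getD k ' ') = isSep (p.getD 0 ' ') := by
    rw [← isSep_lowerChar, h0, isSep_lowerChar]
  rw [hsep, hp0] at hss
  exact Bool.true_eq_false.mp hss

theorem condB_false_of_mid (p l : List Char) (k : Nat) (hk0 : k ≠ 0)
    (hprev : isSep (l.getD (k - 1) ' ') = false) : condB p (PySem.Chars.lower p) l k = false := by
  have h1 : (k == 0) = false := by simpa using hk0
  unfold condB
  rw [h1, hprev]
  simp

-- the crux: at a word-boundary position s, A's token test equals B's positional test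
theorem condA_eq_condB (p l : List Char) (_hm : 0 < p.length) (hfwe : 0 < skipWordA p 0)
    (s : Nat) (hs : s < l.length)
    (hb : (s == 0 || isSep (l.getD (s - 1) ' ')) = true)
    (_hnsep : isSep (l.getD s ' ') = false) :
    condA p (normalizeA (PySem.List.slice p none (some (skipWordA p 0 : Int)))) l
      (PySem.List.slice l (some (s : Int)) (some (skipWordA l s : Int)), s)
    = condB p (PySem.Chars.lower p) l s := by
  have hfle : skipWordA p 0 ≤ p.length := skipWordA_le p 0 (Nat.zero_le _)
  have hfmid : ∀ k, k < skipWordA p 0 → isSep (p.getD k ' ') = false :=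
    fun k hk => (skipWordA_not_sep p 0 k (Nat.zero_le _) hk).2
  have hcast : ((s : Int) + (p.length : Int)) = ((s + p.length : Nat) : Int) := by push_cast; ring
  unfold condA condB
  simp only [hb, Bool.true_and, hcast]
  by_cases hS : PySem.Chars.lower (PySem.List.slice l (some (s : Int)) (some ((s + p.length : Nat) : Int)))
      = PySem.Chars.lower p
  case neg =>
    have hSf : (PySem.Chars.lower (PySem.List.slice l (some (s : Int)) (some ((s + p.length : Nat) : Int)))
        == PySem.Chars.lower p) = false := beq_eq_false_iff_ne.mpr hS
    rw [hSf]
    simp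
  case pos =>
    obtain ⟨hle, hpt⟩ := lower_slice_pointwise p l s (le_of_lt hs) hS
    have hSt : (PySem.Chars.lower (PySem.List.slice l (some (s : Int)) (some ((s + p.length : Nat) : Int)))
        == PySem.Chars.lower p) = true := beq_iff_eq.mpr hS
    have hsepeq : ∀ k, k < p.length → isSep (l.getD (s + k) ' ') = isSep (p.getD k ' ') := by
      intro k hk
      rw [← isSep_lowerChar (l.getD (s + k) ' '), hpt k hk, isSep_lowerChar]
    have hL : (!decide (s + p.length > l.length)) = true := by
      simp only [Bool.not_eq_true']
      exact decide_eq_false (by omega)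
    have hEE : phraseValidEndA l (s + p.length)
        = (s + p.length == l.length || (decide (s + p.length < l.length) && isSep (l.getD (s + p.length) ' '))) := by
      unfold phraseValidEndA
      by_cases he : s + p.length = l.length
      · simp [he]
      · have h1 : (s + p.length == l.length) = false := by simpa using he
        have h2 : decide (s + p.length < l.length) = true := decide_eq_true (by omega)
        rw [h1, h2]
        simp
    rw [hSt, hL, hEE]
    by_cases hE : (s + p.length == l.length || (decide (s + p.length < l.length) && isSep (l.getD (s + p.length) ' '))) = true
    case neg =>
      rw [Bool.not_eq_true] at hE
      rw [hE]
      simp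
    case pos =>
      rw [hE]
      -- it remains to see that A's token/first-word test holds
      have hj : skipWordA l s = s + skipWordA p 0 := by
        apply skipWordA_eq l s (s + skipWordA p 0) (le_of_lt hs) (by omega) (by omega)
        · intro k h1 h2
          have hk' : k - s < skipWordA p 0 := by omega
          have : isSep (l.getD (s + (k - s)) ' ') = isSep (p.getD (k - s) ' ') :=
            hsepeq (k - s) (by omega)
          rw [show s + (k - s) = k by omega] at this
          rw [this]
          exact hfmid (k - s) hk'
        · rcases Nat.lt_or_ge (skipWordA p 0) p.length with hlt | hge
          · right
            rw [hsepeq (skipWordA p 0) hlt]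
            exact skipWordA_stop p 0 (by omega)
          · have hfm : skipWordA p 0 = p.length := by omega
            rw [hfm]
            rcases (Bool.or_eq_true _ _).mp hE with h | h
            · left; exact beq_iff_eq.mp h
            · right; exact ((Bool.and_eq_true _ _).mp h).2
      have hT : normalizeA (PySem.List.slice l (some (s : Int)) (some (skipWordA l s : Int)))
          = normalizeA (PySem.List.slice p none (some (skipWordA p 0 : Int))) := by
        unfold normalizeA PySem.Chars.lower
        simp only [hj]
        rw [PySem.List.slice_natCast, Nat.add_sub_cancel_left, PySem.List.slice_to_natCast]
        -- goal: map lowerChar (take fwe (drop s l)) = map lowerChar (take fwe p)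
        have hS' : PySem.Chars.lower (PySem.List.slice l (some (s : Int)) (some ((s + p.length : Nat) : Int)))
            = PySem.Chars.lower p := hS
        rw [PySem.List.slice_natCast, Nat.add_sub_cancel_left] at hS'
        unfold PySem.Chars.lower at hS'
        have := congrArg (List.take (skipWordA p 0)) hS'
        rw [← List.map_take, ← List.map_take, List.take_take, Nat.min_eq_left hfle] at this -- take fwe (take m X)
        exact this
      rw [hT, beq_self_eq_true]
      simp
  

-- the main per-line invariant: token starts with A's test = positions with B's test
theorem tok_starts (p l : List Char) (hm : 0 < p.length) (hfwe : 0 < skipWordA p 0) (i : Nat) :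
    i ≤ l.length → (i = 0 ∨ (i < l.length → isSep (l.getD i ' ') = true)) →
    ((tokenizeA l i).filter
        (condA p (normalizeA (PySem.List.slice p none (some (skipWordA p 0 : Int)))) l)).map (·.2)
      = (List.range' i (l.length - i)).filter (condB p (PySem.Chars.lower p) l) := by
  have hp0 : isSep (p.getD 0 ' ') = false := (skipWordA_not_sep p 0 0 (le_refl 0) hfwe).2
  fun_induction tokenizeA l i with
  | case1 i i' _h j ih =>
      intro hi hInv
      simp only [show i' = skipSepA l i from rfl, show j = skipWordA l (skipSepA l i) from rfl] at _h ih ⊢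
      have hii' : i ≤ skipSepA l i := skipSepA_ge l i
      have hns : isSep (l.getD (skipSepA l i) ' ') = false := skipSepA_not_sep l i _h
      have hij : skipSepA l i < skipWordA l (skipSepA l i) := skipWordA_gt l _ _h hns
      have hjn : skipWordA l (skipSepA l i) ≤ l.length := skipWordA_le l _ (le_of_lt _h)
      have hb : ((skipSepA l i == 0) || isSep (l.getD (skipSepA l i - 1) ' ')) = true := by
        rcases Nat.eq_or_lt_of_le hii' with heq | hlt
        · rcases hInv with h0 | hf
          · rw [← heq, h0]; simp
          · exfalso
            have := hf (by omega)
            rw [← heq] at hns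
            rw [this] at hns
            exact Bool.true_eq_false.mp hns
        · have := (skipSepA_sep l i (skipSepA l i - 1) (by omega) (by omega)).2
          rw [this]; simp
      have hcond := condA_eq_condB p l hm hfwe (skipSepA l i) _h hb hns
      have IH := ih hjn (Or.inr (fun hlt => skipWordA_stop l _ hlt))
      have hsplit : List.range' i (l.length - i)
          = List.range' i (skipSepA l i - i)
            ++ List.range' (skipSepA l i) (skipWordA l (skipSepA l i) - skipSepA l i)
            ++ List.range' (skipWordA l (skipSepA l i)) (l.length - skipWordA l (skipSepA l i)) := by
        have e1 := @List.range'_append i (skipSepA l i - i)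
          ((skipWordA l (skipSepA l i) - skipSepA l i) + (l.length - skipWordA l (skipSepA l i))) 1
        have e2 := @List.range'_append (skipSepA l i) (skipWordA l (skipSepA l i) - skipSepA l i)
          (l.length - skipWordA l (skipSepA l i)) 1
        simp only [Nat.one_mul] at e1 e2
        rw [show i + (skipSepA l i - i) = skipSepA l i by omega] at e1
        rw [show skipSepA l i + (skipWordA l (skipSepA l i) - skipSepA l i) = skipWordA l (skipSepA l i) by omega] at e2
        rw [List.append_assoc, e2, e1]
        congr 1
        omega
      have hpre : (List.range' i (skipSepA l i - i)).filter (condB p (PySem.Chars.lower p) l) = [] := by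
        rw [List.filter_eq_nil_iff]
        intro a ha
        rw [List.mem_range'_1] at ha
        have hsk := skipSepA_sep l i a ha.1 (by omega)
        simp [condB_false_of_sep p l hm hp0 a hsk.1 hsk.2]
      have hmidrange : List.range' (skipSepA l i) (skipWordA l (skipSepA l i) - skipSepA l i)
          = skipSepA l i :: List.range' (skipSepA l i + 1) (skipWordA l (skipSepA l i) - skipSepA l i - 1) := by
        rw [show skipWordA l (skipSepA l i) - skipSepA l i
            = (skipWordA l (skipSepA l i) - skipSepA l i - 1) + 1 by omega, List.range'_succ]
        simp
      have hmidnil : (List.range' (skipSepA l i + 1) (skipWordA l (skipSepA l i) - skipSepA l i - 1)).filter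
          (condB p (PySem.Chars.lower p) l) = [] := by
        rw [List.filter_eq_nil_iff]
        intro a ha
        rw [List.mem_range'_1] at ha
        have hprev := (skipWordA_not_sep l (skipSepA l i) (a - 1) (by omega) (by omega)).2
        simp [condB_false_of_mid p l a (by omega) hprev]
      rw [hsplit, List.filter_append, List.filter_append, hpre, hmidrange]
      rw [List.filter_cons, List.filter_cons, hmidnil]
      by_cases hc : condB p (PySem.Chars.lower p) l (skipSepA l i) = true
      · rw [if_pos (by rw [hcond]; exact hc), if_pos hc]
        simp only [List.map_cons, List.nil_append, List.singleton_append]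
        rw [IH]
      · rw [if_neg (by rw [hcond]; exact hc), if_neg hc]
        simp only [List.nil_append, List.append_nil]
        exact IH
  | case2 i i' _h =>
      intro hi hInv
      simp only [show i' = skipSepA l i from rfl] at _h
      have hle : l.length ≤ skipSepA l i := by omega
      simp only [List.filter_nil, List.map_nil]
      symm
      rw [List.filter_eq_nil_iff]
      intro a ha
      rw [List.mem_range'_1] at ha
      have hsk := skipSepA_sep l i a ha.1 (by omega)
      simp [condB_false_of_sep p l hm hp0 a hsk.1 hsk.2]


theorem lineHitsA_eq (p : List Char) (hm : 0 < p.length) (hfwe : 0 < skipWordA p 0)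
    (ln : Int) (l : List Char) (acc : List String) :
    lineHitsA p (normalizeA (PySem.List.slice p none (some (skipWordA p 0 : Int)))) ln l acc
      = acc ++ ((List.range' 0 l.length).filter (condB p (PySem.Chars.lower p) l)).map (hitStr ln) := by
  unfold lineHitsA
  show (tokenizeA l 0).foldl (fun hits t =>
      if condA p (normalizeA (PySem.List.slice p none (some (skipWordA p 0 : Int)))) l t
      then hits ++ [(fun t : List Char × Nat => hitStr ln t.2) t] else hits) acc = _
  rw [PySem.List.foldl_append_if]
  congr 1
  rw [show (List.range' 0 l.length) = (List.range' 0 (l.length - 0)) from rfl,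
    ← tok_starts p l hm hfwe 0 (Nat.zero_le _) (Or.inl rfl), List.map_map]
  rfl

theorem lineHitsB_eq (p : List Char) (ln : Int) (l : List Char) (acc : List String) :
    lineHitsB p (PySem.Chars.lower p) ln l acc
      = acc ++ ((List.range' 0 l.length).filter (condB p (PySem.Chars.lower p) l)).map (hitStr ln) := by
  unfold lineHitsB
  show (List.range l.length).foldl (fun hits i =>
      if condB p (PySem.Chars.lower p) l i
      then hits ++ [(fun i : Nat => hitStr ln i) i] else hits) acc = _
  rw [PySem.List.foldl_append_if, List.range_eq_range']

theorem outer_eq (p : List Char) (hm : 0 < p.length) (hfwe : 0 < skipWordA p 0) :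
    ∀ (ls : List String) (s : Int) (acc : List String),
    (PySem.List.enumerate ls s).foldl
        (fun hits q => lineHitsA p (normalizeA (PySem.List.slice p none (some (skipWordA p 0 : Int)))) q.1 q.2.toList hits) acc
      = (PySem.List.enumerate ls s).foldl
        (fun hits q => lineHitsB p (PySem.Chars.lower p) q.1 q.2.toList hits) acc := by
  intro ls
  induction ls with
  | nil => intro s acc; rfl
  | cons x xs ih =>
      intro s acc
      rw [PySem.List.enumerate_cons]
      simp only [List.foldl_cons]
      rw [lineHitsA_eq p hm hfwe s x.toList acc, lineHitsB_eq p s x.toList acc]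
      exact ih (s + 1) _

theorem fwe_zero_iff (p : List Char) : skipWordA p 0 = 0 ↔ (p = [] ∨ isSep (p.getD 0 ' ') = true) := by
  rw [skipWordA]
  cases p with
  | nil => simp
  | cons c rest =>
    have h0 : 0 < (c :: rest).length := by simp
    simp only [h0, dif_pos]
    by_cases hs : isSep c
    · simp [hs, List.getD]
    · have := skipWordA_ge (c :: rest) (0 + 1)
      simp only [List.getElem_cons_zero, hs, if_neg Bool.false_ne_true,
        List.getD_cons_zero]
      constructor
      · intro h; omega
      · rintro (h | h)
        · simp at h
        · simp at h

-- ===== VERDICT (by name: the statement is the Claim_ definition above) =====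
theorem solve_phrase_spec : Claim_equal_solve_phrase := by
  intro lines query _
  unfold Spec_solve_phrase solve_phrase solve_phrase_alt
  cases hp : PySem.List.slice query.toList (some 1) (some (-1)) with
  | nil =>
      have h0 : skipWordA ([] : List Char) 0 = 0 := by rw [fwe_zero_iff]; left; rfl
      simp [h0]
  | cons c rest =>
      by_cases hsep : isSep c = true
      · have h0 : skipWordA (c :: rest) 0 = 0 := by
          rw [fwe_zero_iff]; right; simp [List.getD, hsep]
        simp [h0, hsep]
      · have hfwe : 0 < skipWordA (c :: rest) 0 := by
          rcases Nat.eq_zero_or_pos (skipWordA (c :: rest) 0) with h | h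
          · rw [fwe_zero_iff] at h
            rcases h with h | h
            · simp at h
            · simp [List.getD] at h
              exact absurd h hsep
          · exact h
        have hm : 0 < (c :: rest).length := by simp
        simp only []
        rw [if_neg hsep]
        rw [outer_eq (c :: rest) hm hfwe lines 1 []]
        unfold formatResultA
        rw [if_neg (by omega : ¬ skipWordA (c :: rest) 0 = 0)]
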